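-- pv_equiv track=rewrite | github.com/johnzhoudev/leetcode-practice | meta_leetcode/408. Valid Word Abbreviation.py | solve
-- ===== SOURCE A (Python) =====
-- def solve(word, abbr):
--
--     wordIdx = 0
--
--     num = 0
--     for c in abbr:
--         if c.isnumeric():
--             if num == 0 and int(c) == 0: return False   # in case invalid
--             num = num * 10 + int(c)
--         else:
--             # if num just parsed, advance
--             if num != 0:
--                 wordIdx += num
--                 num = 0
--
--             if wordIdx >= len(word): return False
--
--             # check char
--             if c != word[wordIdx]: return False
--             wordIdx += 1
--
--     if num != 0:
--         wordIdx += num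
--         num = 0
--
--     return wordIdx == len(word)
-- ===== SOURCE B (Python) =====
-- def solve(word, abbr):
--     # pass 1: tokenize abbr into int counts and literal chars
--     tokens = []
--     i = 0
--     n = len(abbr)
--     while i < n:
--         c = abbr[i]
--         if c.isnumeric():
--             j = i
--             while j < n and abbr[j].isnumeric():
--                 j += 1
--             if int(abbr[i]) == 0:
--                 return False
--             tokens.append(int(abbr[i:j]))
--             i = j
--         else:
--             tokens.append(c)
--             i += 1
--     # pass 2: match tokens against word
--     wi = 0
--     for t in tokens:
--         if isinstance(t, int):
--             wi += t
--         else: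
--             if wi >= len(word) or word[wi] != t:
--                 return False
--             wi += 1
--     return wi == len(word)
-- ===== Notes on version B (the rewrite author's own statement) =====
-- stated objective: alternative
-- what changed: Replaces A's single stateful loop (carrying a pending number across iterations) by two separate passes: a tokenizer that groups digit runs of abbr into integer tokens (rejecting leading zeros), then a matcher that walks the token list against word.
import Mathlib
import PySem

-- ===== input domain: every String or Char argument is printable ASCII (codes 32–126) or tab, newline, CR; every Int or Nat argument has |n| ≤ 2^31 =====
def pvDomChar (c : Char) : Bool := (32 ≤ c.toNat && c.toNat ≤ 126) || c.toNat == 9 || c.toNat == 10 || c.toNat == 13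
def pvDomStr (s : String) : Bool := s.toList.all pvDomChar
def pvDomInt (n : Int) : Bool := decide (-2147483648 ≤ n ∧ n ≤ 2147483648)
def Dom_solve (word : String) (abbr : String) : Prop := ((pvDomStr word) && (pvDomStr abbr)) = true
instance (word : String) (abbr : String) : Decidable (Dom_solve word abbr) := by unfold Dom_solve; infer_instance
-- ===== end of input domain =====

-- B tokenizes abbr into (count | char) tokens in one pass, then matches tokens against word
-- in a second pass — an alternative decomposition of A's single stateful loop; same cost.

-- on the printable-ASCII domain, Python's c.isnumeric() holds exactly for '0'..'9'
def pvIsDig (c : Char) : Bool := '0' ≤ c && c ≤ '9'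

-- int(c) for a digit character
def pvDigVal (c : Char) : Nat := c.toNat - 48

-- ===== PORT A =====
-- A's single loop over abbr, carrying wordIdx and the pending number num
def solveLoop (w : List Char) (cs : List Char) (i : Nat) (num : Nat) : Bool :=
  match cs with
  | [] => (if num ≠ 0 then i + num else i) == w.length
  | c :: rest =>
    if pvIsDig c then
      if num = 0 ∧ pvDigVal c = 0 then false
      else solveLoop w rest i (num * 10 + pvDigVal c)
    else
      let i' := if num ≠ 0 then i + num else i
      if h : i' < w.length then
        if c ≠ w[i'] then false else solveLoop w rest (i' + 1) 0
      else false

def solve (word : String) (abbr : String) : Bool :=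
  solveLoop word.toList abbr.toList 0 0

-- ===== PORT B =====
inductive Tok where
  | num (n : Nat)
  | ch (c : Char)
deriving DecidableEq, Repr

-- pass 1: group digit runs into integer tokens; none = leading-zero rejection (B returns False)
def tokenize : List Char → Option (List Tok)
  | [] => some []
  | c :: rest =>
    if pvIsDig c then
      if c = '0' then none
      else
        let ds := rest.takeWhile pvIsDig
        let rest' := rest.dropWhile pvIsDig
        let v := ds.foldl (fun a d => a * 10 + pvDigVal d) (pvDigVal c)
        (tokenize rest').map (Tok.num v :: ·)
    else (tokenize rest).map (Tok.ch c :: ·)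
  termination_by cs => cs.length
  decreasing_by
    · exact Nat.lt_succ_of_le (List.length_dropWhile_le _ _)
    · exact Nat.lt_succ_self _

-- pass 2: walk the tokens against word
def matchToks (w : List Char) (toks : List Tok) (i : Nat) : Bool :=
  match toks with
  | [] => i == w.length
  | Tok.num n :: t => matchToks w t (i + n)
  | Tok.ch c :: t =>
    if h : i < w.length then
      if w[i] = c then matchToks w t (i + 1) else false
    else false

def solve_alt (word : String) (abbr : String) : Bool :=
  match tokenize abbr.toList with
  | none => false
  | some t => matchToks word.toList t 0

-- ===== PRECONDITION & SPEC =====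
def Spec_solve (word : String) (abbr : String) (out : Bool) : Prop := out = solve_alt word abbr
instance (word : String) (abbr : String) (out : Bool) : Decidable (Spec_solve word abbr out) := by unfold Spec_solve; infer_instance

-- ===== CLAIM (what is proved, stated in full; the proofs are below) =====
def Claim_equal_solve : Prop := ∀ (word : String) (abbr : String), Dom_solve word abbr → Spec_solve word abbr (solve word abbr)

-- ===== LEMMAS AND PROOFS =====

-- B's result as a function of the optional token list
def bMatch (w : List Char) (o : Option (List Tok)) (i : Nat) : Bool :=
  match o with
  | none => false
  | some t => matchToks w t i

theorem bMatch_map_num (w : List Char) (o : Option (List Tok)) (v i : Nat) :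
    bMatch w (o.map (Tok.num v :: ·)) i = bMatch w o (i + v) := by
  cases o <;> simp [bMatch, matchToks]

theorem bMatch_map_ch (w : List Char) (o : Option (List Tok)) (c : Char) (i : Nat) :
    bMatch w (o.map (Tok.ch c :: ·)) i =
      (if h : i < w.length then if w[i] = c then bMatch w o (i + 1) else false else false) := by
  cases o with
  | none => simp only [Option.map_none, bMatch]; split <;> simp
  | some t => simp [bMatch, matchToks]

-- with a positive pending number, A's loop consumes a digit run by accumulating it
theorem solveLoop_digits (w : List Char) :
    ∀ (cs : List Char) (i num : Nat), 0 < num →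
      solveLoop w cs i num =
        solveLoop w (cs.dropWhile pvIsDig) i
          ((cs.takeWhile pvIsDig).foldl (fun a d => a * 10 + pvDigVal d) num) := by
  intro cs
  induction cs with
  | nil => intro i num _; simp
  | cons c rest ih =>
    intro i num hnum
    by_cases hc : pvIsDig c = true
    · have hz : ¬ (num = 0 ∧ pvDigVal c = 0) := by rintro ⟨h0, _⟩; omega
      simp only [solveLoop, hc, if_neg hz, List.takeWhile, List.dropWhile, List.foldl]
      rw [ih i (num * 10 + pvDigVal c) (by positivity)]
      simp
    · simp [List.takeWhile, List.dropWhile, hc]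

theorem foldl_digits_pos (ds : List Char) :
    ∀ a : Nat, 0 < a → 0 < ds.foldl (fun a d => a * 10 + pvDigVal d) a := by
  induction ds with
  | nil => intro a ha; simpa using ha
  | cons d t ih => intro a ha; exact ih _ (by positivity)

theorem pvDigVal_pos {c : Char} (hd : pvIsDig c = true) (h0 : c ≠ '0') : 0 < pvDigVal c := by
  simp only [pvIsDig, Bool.and_eq_true, decide_eq_true_eq, Char.le_def,
    UInt32.le_iff_toNat_le] at hd
  have h48 : (48:Nat) ≤ c.val.toNat := hd.1
  have hne : c.val.toNat ≠ 48 := by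
    intro h
    apply h0; apply Char.ext
    exact UInt32.toNat_inj.mp h
  simp only [pvDigVal, Char.toNat]
  omega

theorem dropWhile_head_false {p : Char → Bool} {l : List Char} {c : Char} {rr : List Char}
    (h : l.dropWhile p = c :: rr) : p c = false := by
  have h2 : l.dropWhile p ≠ [] := by simp [h]
  have := List.head_dropWhile_not (l := l) (p := p) h2
  simpa [h] using this

-- both versions take the same step on a literal character at position j
theorem char_step (w rest : List Char)
    (ihrest : ∀ i : Nat, solveLoop w rest i 0 = bMatch w (tokenize rest) i)
    (c : Char) (j : Nat) :
    (if h : j < w.length then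
        (if c ≠ w[j] then false else solveLoop w rest (j + 1) 0)
      else false)
    = (if h : j < w.length then
        (if w[j] = c then bMatch w (tokenize rest) (j + 1) else false)
      else false) := by
  split
  · next h =>
    by_cases he : c = w[j]'h
    · simp [he, ihrest]
    · have he2 : ¬ (w[j]'h = c) := fun hh => he (Eq.symm hh)
      simp [he, he2]
  · rfl

-- the core equivalence: A's loop with no pending number equals B's tokenize-then-match
theorem main_aux (w : List Char) :
    ∀ (n : Nat) (cs : List Char), cs.length ≤ n → ∀ i : Nat,
      solveLoop w cs i 0 = bMatch w (tokenize cs) i := by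
  intro n
  induction n with
  | zero =>
    intro cs hlen i
    have : cs = [] := List.length_eq_zero_iff.mp (Nat.le_zero.mp hlen)
    subst this
    rw [show tokenize ([] : List Char) = some [] by rw [tokenize]]
    simp [solveLoop, bMatch, matchToks]
  | succ n ih =>
    intro cs hlen i
    cases cs with
    | nil =>
      rw [show tokenize ([] : List Char) = some [] by rw [tokenize]]
      simp [solveLoop, bMatch, matchToks]
    | cons c rest =>
      by_cases hc : pvIsDig c = true
      · by_cases h0 : c = '0'
        · subst h0
          rw [show tokenize ('0' :: rest) = none by
                rw [tokenize]; simp [show pvIsDig '0' = true by decide]]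
          simp [solveLoop, bMatch, show pvIsDig '0' = true by decide,
            show pvDigVal '0' = 0 by decide]
        · -- digit run with nonzero leading digit
          have hdp : 0 < pvDigVal c := pvDigVal_pos hc h0
          have hvpos : 0 < (rest.takeWhile pvIsDig).foldl
              (fun a d => a * 10 + pvDigVal d) (pvDigVal c) :=
            foldl_digits_pos _ _ hdp
          have hA : solveLoop w (c :: rest) i 0 =
              solveLoop w (rest.dropWhile pvIsDig) i
                ((rest.takeWhile pvIsDig).foldl (fun a d => a * 10 + pvDigVal d)
                  (pvDigVal c)) := by
            rw [show solveLoop w (c :: rest) i 0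
                  = solveLoop w rest i (pvDigVal c) by
              simp [solveLoop, hc, hdp.ne']]
            exact solveLoop_digits w rest i _ hdp
          have hT : tokenize (c :: rest) =
              (tokenize (rest.dropWhile pvIsDig)).map
                (Tok.num ((rest.takeWhile pvIsDig).foldl
                  (fun a d => a * 10 + pvDigVal d) (pvDigVal c)) :: ·) := by
            rw [tokenize]; simp [hc, h0]
          rw [hA, hT, bMatch_map_num]
          have hlen' : (rest.dropWhile pvIsDig).length ≤ n := by
            have := List.length_dropWhile_le pvIsDig rest
            simp at hlen; omega
          have hnz : ((rest.takeWhile pvIsDig).foldl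
              (fun a d => a * 10 + pvDigVal d) (pvDigVal c)) ≠ 0 := by omega
          cases hrr : rest.dropWhile pvIsDig with
          | nil =>
            rw [show tokenize ([] : List Char) = some [] by rw [tokenize]]
            simp [solveLoop, bMatch, matchToks, hnz]
          | cons c' rr =>
            have hcd : pvIsDig c' = false := dropWhile_head_false hrr
            rw [show tokenize (c' :: rr) = (tokenize rr).map (Tok.ch c' :: ·) by
                  rw [tokenize]; simp [hcd]]
            rw [bMatch_map_ch]
            have hlen'' : rr.length ≤ n := by
              have h1 : (c' :: rr).length ≤ n := hrr ▸ hlen'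
              simp at h1; omega
            rw [show solveLoop w (c' :: rr) i
                    ((rest.takeWhile pvIsDig).foldl
                      (fun a d => a * 10 + pvDigVal d) (pvDigVal c))
                  = (if h : (i + (rest.takeWhile pvIsDig).foldl
                          (fun a d => a * 10 + pvDigVal d) (pvDigVal c)) < w.length then
                      (if c' ≠ w[i + (rest.takeWhile pvIsDig).foldl
                          (fun a d => a * 10 + pvDigVal d) (pvDigVal c)] then false
                        else solveLoop w rr ((i + (rest.takeWhile pvIsDig).foldl
                          (fun a d => a * 10 + pvDigVal d) (pvDigVal c)) + 1) 0)
                    else false) by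
                  simp only [solveLoop, hcd, Bool.false_eq_true, if_false, ne_eq, hnz,
                    not_false_eq_true, if_true]]
            exact char_step w rr (fun j => ih rr hlen'' j) c' _
      · -- literal character
        rw [show tokenize (c :: rest) = (tokenize rest).map (Tok.ch c :: ·) by
              rw [tokenize]; simp [hc]]
        rw [bMatch_map_ch]
        have hlen' : rest.length ≤ n := by simp at hlen; omega
        rw [show solveLoop w (c :: rest) i 0
              = (if h : i < w.length then
                  (if c ≠ w[i] then false else solveLoop w rest (i + 1) 0)
                else false) by
              simp only [solveLoop, hc, Bool.false_eq_true, if_false, ne_eq,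
                not_true_eq_false]]
        exact char_step w rest (fun j => ih rest hlen' j) c i

-- ===== VERDICT (by name: the statement is the Claim_ definition above) =====
theorem solve_spec : Claim_equal_solve := by
  intro word abbr _
  unfold Spec_solve solve solve_alt
  rw [main_aux word.toList abbr.toList.length abbr.toList (le_refl _)]
  cases tokenize abbr.toList <;> simp [bMatch]
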